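-- pv_equiv track=rewrite | github.com/FudanMPL/Garnet | Compiler/GFA/NFGen/funcs.py | coeff_reorgnize
-- ===== SOURCE A (Python) =====
-- def coeff_reorgnize(coeff, c):
--     """Refine the coeff of a0 + a1(x-c) + a2(x-c)^2 + ... + an(x-c)^n;
--     to b0 + b1x + b2x^2 + ... + bnx^n;
--     """
--     res = [[1]]
--
--     for i in range(len(coeff)):
--         tmp = res[-1]
--         tmp_reverse = [-k for k in tmp]
--         tmp_append = tmp.copy()
--         tmp_reverse.append(0)
--         tmp_append.insert(0, 0)
--         tmp = [tmp_reverse[k] + tmp_append[k] for k in range(len(tmp_reverse))]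
--         res.append(tmp)
--
--     tmp_coeff = [0] * (len(coeff) + 1)
--     res = res[1:]
--     for i in range(len(res)):
--         m_max = len(res[i]) - 1
--         for k in range(len(res[i])):
--             tmp_coeff[k] += coeff[i] * res[i][k] * (c**(m_max - k))
--
--     tmp_coeff[0] += coeff[0]
--     return tmp_coeff
-- ===== SOURCE B (Python) =====
-- def coeff_reorgnize(coeff, c):
--     """Refine the coeff of a0 + a1(x-c) + a2(x-c)^2 + ... + an(x-c)^n;
--     to b0 + b1x + b2x^2 + ... + bnx^n;
--     (matches A: output = coeff[0] + sum_i coeff[i]*(x-c)^(i+1))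
--     """
--
--     def mul_xc(poly):
--         # multiply a coefficient list (lowest degree first) by (x - c), one pass
--         out = []
--         prev = 0
--         for p in poly:
--             out.append(prev - c * p)
--             prev = p
--         out.append(prev)
--         return out
--
--     poly = [coeff[-1]]
--     for a in reversed(coeff[:-1]):
--         poly = mul_xc(poly)
--         poly[0] += a
--     poly = mul_xc(poly)
--     poly[0] += coeff[0]
--     return poly
-- ===== Notes on version B (the rewrite author's own statement) =====
-- stated objective: faster
-- what changed: Replaces A's Pascal-style table of (x-1)^m rows plus an explicit c**(m-k) power for every entry by a Horner-style loop that iteratively multiplies the coefficient list by (x-c) in one pass, so no row table and no big-integer exponentiations are built.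
import Mathlib
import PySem

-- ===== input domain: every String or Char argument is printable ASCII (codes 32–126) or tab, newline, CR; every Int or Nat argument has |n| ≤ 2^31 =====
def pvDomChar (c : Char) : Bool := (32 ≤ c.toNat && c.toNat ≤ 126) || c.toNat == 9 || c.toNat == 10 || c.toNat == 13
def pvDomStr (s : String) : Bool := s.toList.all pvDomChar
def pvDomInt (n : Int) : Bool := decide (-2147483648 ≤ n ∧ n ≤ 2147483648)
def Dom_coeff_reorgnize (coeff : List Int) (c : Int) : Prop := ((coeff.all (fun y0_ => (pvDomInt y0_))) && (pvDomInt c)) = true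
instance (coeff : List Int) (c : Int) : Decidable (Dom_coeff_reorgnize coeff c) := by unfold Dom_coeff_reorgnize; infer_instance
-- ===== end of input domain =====

-- B replaces A's Pascal-style table of (x-1)^m rows plus explicit c**e powers by a
-- Horner-style iterated one-pass multiplication by (x-c); objective: faster (no table, no big powers).

-- ===== PORT A =====
-- one body of A's first loop: tmp_reverse/tmp_append construction (all Python indices in range)
def pvBuildRow (tmp : List Int) : List Int :=
  let tmp_reverse := (tmp.map (fun k => -k)) ++ [0]
  let tmp_append := 0 :: tmp
  (List.range tmp_reverse.length).map (fun k => tmp_reverse.getD k 0 + tmp_append.getD k 0)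

def coeff_reorgnize (coeff : List Int) (c : Int) : List Int :=
  let res := (List.range coeff.length).foldl (fun res _ => res ++ [pvBuildRow (res.getLastD [])]) [[1]]
  let tmp_coeff := List.replicate (coeff.length + 1) (0 : Int)
  let res2 := res.drop 1
  let tmp_coeff := (List.range res2.length).foldl (fun tc i =>
      let row := res2.getD i []
      let m_max := row.length - 1
      (List.range row.length).foldl (fun tc k =>
        tc.set k (tc.getD k 0 + coeff.getD i 0 * row.getD k 0 * c ^ (m_max - k))) tc) tmp_coeff
  -- tmp_coeff[0] += coeff[0]; coeff[0] raises IndexError for empty coeff (excluded by Pre_)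
  tmp_coeff.set 0 (tmp_coeff.getD 0 0 + coeff.getD 0 0)

-- ===== PORT B =====
-- Source B's mul_xc: one pass multiplying a coefficient list by (x - c), carrying the previous entry
def pvMulXC (c : Int) : Int → List Int → List Int
  | prev, [] => [prev]
  | prev, p :: ps => (prev - c * p) :: pvMulXC c p ps

-- Source B's `poly[0] += a` (poly is never empty in Source B; the [] case is unreachable)
def pvAddHead (a : Int) : List Int → List Int
  | [] => []
  | x :: xs => (x + a) :: xs

def coeff_reorgnize_alt (coeff : List Int) (c : Int) : List Int :=
  -- `coeff[-1]` raises IndexError for empty coeff (excluded by Pre_)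
  let poly := [coeff.getLastD 0]
  let poly := (coeff.dropLast.reverse).foldl (fun poly a => pvAddHead a (pvMulXC c 0 poly)) poly
  pvAddHead (coeff.getD 0 0) (pvMulXC c 0 poly)

-- ===== PRECONDITION & SPEC =====
-- Python A (and B) raise IndexError on empty coeff: excluded.
def Pre_coeff_reorgnize (coeff : List Int) (c : Int) : Prop := coeff ≠ []
instance (coeff : List Int) (c : Int) : Decidable (Pre_coeff_reorgnize coeff c) := by unfold Pre_coeff_reorgnize; infer_instance
def pvWitness_coeff_reorgnize : List Int × Int := ([1, 2], 3)

def Spec_coeff_reorgnize (coeff : List Int) (c : Int) (out : List Int) : Prop := out = coeff_reorgnize_alt coeff c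
instance (coeff : List Int) (c : Int) (out : List Int) : Decidable (Spec_coeff_reorgnize coeff c out) := by unfold Spec_coeff_reorgnize; infer_instance

-- ===== CLAIM (what is proved, stated in full; the proofs are below) =====
def Claim_equal_coeff_reorgnize : Prop := ∀ (coeff : List Int) (c : Int), Dom_coeff_reorgnize coeff c → Pre_coeff_reorgnize coeff c → Spec_coeff_reorgnize coeff c (coeff_reorgnize coeff c)

-- ===== LEMMAS AND PROOFS =====

-- coefficients of (x-c)^m, lowest degree first
def pvP (c : Int) : Nat → List Int
  | 0 => [1]
  | m + 1 => pvMulXC c 0 (pvP c m)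

-- coefficient k of Σ_i coeff[i]·(x-c)^(i+1)
def pvSum (c : Int) (coeff : List Int) (k : Nat) : Int :=
  ∑ i ∈ Finset.range coeff.length, coeff.getD i 0 * (pvP c (i + 1)).getD k 0

theorem pvMulXC_length (c prev : Int) (p : List Int) : (pvMulXC c prev p).length = p.length + 1 := by
  induction p generalizing prev with
  | nil => rfl
  | cons q qs ih => simp [pvMulXC, ih]

theorem pvMulXC_getD (c prev : Int) (p : List Int) (k : Nat) :
    (pvMulXC c prev p).getD k 0 = (prev :: p).getD k 0 - c * p.getD k 0 := by
  induction p generalizing prev k with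
  | nil => cases k <;> simp [pvMulXC]
  | cons q qs ih => cases k with
    | zero => simp [pvMulXC]
    | succ j => simpa [pvMulXC] using ih q j

theorem pvList_ext_getD (a b : List Int) (hl : a.length = b.length)
    (h : ∀ k, a.getD k 0 = b.getD k 0) : a = b := by
  apply List.ext_getElem hl
  intro i h1 h2
  have := h i
  rwa [List.getD_eq_getElem _ _ h1, List.getD_eq_getElem _ _ h2] at this

theorem pvGetD_range_map {α : Type} (f : Nat → α) (d : α) (L k : Nat) :
    (((List.range L).map f).getD k d) = if k < L then f k else d := by
  by_cases h : k < L
  · rw [List.getD_eq_getElem _ _ (by simpa using h)]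
    simp [h]
  · rw [List.getD_eq_default _ _ (by simpa using Nat.le_of_not_lt h)]
    simp [h]

theorem pvNegPad_getD (r : List Int) (k : Nat) :
    ((r.map (fun x => -x)) ++ [0]).getD k 0 = -(r.getD k 0) := by
  induction r generalizing k with
  | nil => cases k <;> simp
  | cons x xs ih => cases k with
    | zero => simp
    | succ j => simpa using ih j

theorem pvBuildRow_eq (r : List Int) : pvBuildRow r = pvMulXC 1 0 r := by
  apply pvList_ext_getD
  · simp [pvBuildRow, pvMulXC_length]
  · intro k
    simp only [pvBuildRow]
    rw [pvGetD_range_map, pvMulXC_getD]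
    by_cases h : k < ((r.map (fun x => -x)) ++ [0]).length
    · simp only [h, if_true, pvNegPad_getD]
      ring
    · simp only [h, if_false]
      simp only [List.length_append, List.length_map, List.length_singleton] at h
      rw [List.getD_eq_default _ _ (by simp; omega), List.getD_eq_default _ _ (by omega)]
      ring

theorem pvP_length (c : Int) (m : Nat) : (pvP c m).length = m + 1 := by
  induction m with
  | zero => rfl
  | succ m ih => simp [pvP, pvMulXC_length, ih]

theorem pvP_getD_zero (c : Int) (m k : Nat) (h : m + 1 ≤ k) : (pvP c m).getD k 0 = 0 := by
  apply List.getD_eq_default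
  rw [pvP_length]; omega

theorem pvP_one (c : Int) : pvP c 1 = [-c, 1] := by
  simp [pvP, pvMulXC]

theorem pvP_scale (c : Int) (m k : Nat) :
    (pvP c m).getD k 0 = (pvP 1 m).getD k 0 * c ^ (m - k) := by
  induction m generalizing k with
  | zero => simp [pvP]
  | succ m ih =>
    rw [show pvP c (m+1) = pvMulXC c 0 (pvP c m) from rfl,
        show pvP 1 (m+1) = pvMulXC 1 0 (pvP 1 m) from rfl,
        pvMulXC_getD, pvMulXC_getD]
    cases k with
    | zero =>
      simp only [List.getD_cons_zero, Nat.sub_zero]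
      rw [ih 0, Nat.sub_zero, pow_succ]
      ring
    | succ j =>
      simp only [List.getD_cons_succ]
      rw [ih j, ih (j+1)]
      by_cases hj : j < m
      · have h1 : m - j = (m - (j+1)) + 1 := by omega
        have h2 : m + 1 - (j + 1) = m - j := by omega
        rw [h2, h1, pow_succ]
        ring
      · have h0 : (pvP 1 m).getD (j+1) 0 = 0 := pvP_getD_zero 1 m (j+1) (by omega)
        have h1 : m - j = 0 := by omega
        have h2 : m + 1 - (j + 1) = 0 := by omega
        rw [h0, h1, h2]
        ring

-- A's first loop builds exactly the rows pvP 1 0, …, pvP 1 n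
theorem pvResList (n : Nat) :
    (List.range n).foldl (fun res _ => res ++ [pvBuildRow (res.getLastD [])]) [[1]]
      = (List.range (n + 1)).map (pvP 1) := by
  induction n with
  | zero => simp [pvP]
  | succ n ih =>
    rw [List.range_succ, List.foldl_append, ih]
    simp only [List.foldl_cons, List.foldl_nil]
    rw [show List.range (n+1) = List.range n ++ [n] from List.range_succ, List.map_append]
    simp only [List.map_cons, List.map_nil, List.getLastD_concat]
    rw [pvBuildRow_eq, show pvMulXC 1 0 (pvP 1 n) = pvP 1 (n+1) from rfl]
    rw [show List.range (n+2) = List.range (n+1) ++ [n+1] from List.range_succ, List.map_append,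
        show List.range (n+1) = List.range n ++ [n] from List.range_succ, List.map_append]
    simp

theorem pvDrop1 (n : Nat) :
    (((List.range (n+1)).map (pvP 1)).drop 1) = (List.range n).map (fun m => pvP 1 (m+1)) := by
  rw [List.range_succ_eq_map]
  simp [List.map_map, Function.comp_def]

theorem pvGetD_set_eq (l : List Int) (i : Nat) (v : Int) (h : i < l.length) :
    (l.set i v).getD i 0 = v := by
  rw [List.getD_eq_getElem _ _ (by simpa using h)]
  simp

theorem pvGetD_set_ne (l : List Int) (i k : Nat) (v : Int) (h : i ≠ k) :
    (l.set i v).getD k 0 = l.getD k 0 := by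
  simp [List.getD_eq_getElem?_getD, List.getElem?_set_ne h]

-- generic inner accumulation loop of A's second loop
theorem pvInnerFold (g : Nat → Int) (L : Nat) (tc : List Int) (hL : L ≤ tc.length) :
    ((List.range L).foldl (fun tc k => tc.set k (tc.getD k 0 + g k)) tc).length = tc.length ∧
    ∀ k, ((List.range L).foldl (fun tc k => tc.set k (tc.getD k 0 + g k)) tc).getD k 0
            = tc.getD k 0 + (if k < L then g k else 0) := by
  induction L with
  | zero => simp
  | succ L ih =>
    obtain ⟨hlen, hget⟩ := ih (by omega)
    rw [List.range_succ, List.foldl_append]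
    simp only [List.foldl_cons, List.foldl_nil]
    constructor
    · rw [List.length_set, hlen]
    · intro k
      by_cases hk : k = L
      · subst hk
        rw [pvGetD_set_eq _ _ _ (by rw [hlen]; omega), hget k]
        simp
      · rw [pvGetD_set_ne _ _ _ _ (fun h => hk h.symm), hget k]
        have hkk : k < L + 1 ↔ k < L := by omega
        simp [hkk]

-- the scaled Pascal-row term is the coefficient of (x-c)^(i+1)
theorem pvScaledTerm (c x : Int) (i k : Nat) :
    (if k < i + 2 then x * (pvP 1 (i+1)).getD k 0 * c ^ (i + 1 - k) else 0)
      = x * (pvP c (i+1)).getD k 0 := by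
  by_cases h : k < i + 2
  · rw [if_pos h, pvP_scale c (i+1) k]
    ring
  · rw [if_neg h, pvP_getD_zero c (i+1) k (by omega)]
    ring

-- A's second loop computes pvSum
theorem pvOuterFold (c : Int) (coeff : List Int) (j : Nat) (hj : j ≤ coeff.length) :
    ((List.range j).foldl (fun tc i =>
        (List.range (((List.range coeff.length).map (fun m => pvP 1 (m+1))).getD i []).length).foldl
          (fun tc k =>
            tc.set k (tc.getD k 0 + coeff.getD i 0
              * (((List.range coeff.length).map (fun m => pvP 1 (m+1))).getD i []).getD k 0
              * c ^ ((((List.range coeff.length).map (fun m => pvP 1 (m+1))).getD i []).length - 1 - k))) tc)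
      (List.replicate (coeff.length + 1) (0 : Int))).length = coeff.length + 1 ∧
    ∀ k, ((List.range j).foldl (fun tc i =>
        (List.range (((List.range coeff.length).map (fun m => pvP 1 (m+1))).getD i []).length).foldl
          (fun tc k =>
            tc.set k (tc.getD k 0 + coeff.getD i 0
              * (((List.range coeff.length).map (fun m => pvP 1 (m+1))).getD i []).getD k 0
              * c ^ ((((List.range coeff.length).map (fun m => pvP 1 (m+1))).getD i []).length - 1 - k))) tc)
      (List.replicate (coeff.length + 1) (0 : Int))).getD k 0
      = ∑ i ∈ Finset.range j, coeff.getD i 0 * (pvP c (i + 1)).getD k 0 := by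
  induction j with
  | zero =>
    constructor
    · simp
    · intro k
      simp [List.getD_eq_getElem?_getD, List.getElem?_replicate]
      split <;> rfl
  | succ j ih =>
    obtain ⟨hlen, hget⟩ := ih (by omega)
    rw [List.range_succ, List.foldl_append]
    simp only [List.foldl_cons, List.foldl_nil]
    have hrow : (((List.range coeff.length).map (fun m => pvP 1 (m+1)))).getD j [] = pvP 1 (j+1) := by
      rw [pvGetD_range_map]
      simp [Nat.lt_of_lt_of_le (Nat.lt_succ_self j) hj]
    rw [hrow]
    have hrl : (pvP 1 (j+1)).length = j + 2 := pvP_length 1 (j+1)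
    obtain ⟨ilen, iget⟩ := pvInnerFold
      (fun k => coeff.getD j 0 * (pvP 1 (j+1)).getD k 0 * c ^ ((pvP 1 (j+1)).length - 1 - k))
      ((pvP 1 (j+1)).length) _ (by rw [hlen, hrl]; omega)
    constructor
    · rw [ilen, hlen]
    · intro k
      rw [iget k, hget k, Finset.sum_range_succ]
      congr 1
      rw [hrl]
      simpa using pvScaledTerm c (coeff.getD j 0) j k

-- Source B's Horner fold, as a function for the induction
def pvHf (c : Int) (coeff : List Int) : List Int :=
  (coeff.dropLast.reverse).foldl (fun poly a => pvAddHead a (pvMulXC c 0 poly)) [coeff.getLastD 0]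

theorem pvHf_cons (c a b : Int) (bs : List Int) :
    pvHf c (a :: b :: bs) = pvAddHead a (pvMulXC c 0 (pvHf c (b :: bs))) := by
  unfold pvHf
  rw [List.dropLast_cons_of_ne_nil (by simp), List.reverse_cons, List.foldl_append]
  simp

-- B's core (before the final `poly[0] += coeff[0]`) computes pvSum
theorem pvBcore (c : Int) (coeff : List Int) (h : coeff ≠ []) :
    (pvMulXC c 0 (pvHf c coeff)).length = coeff.length + 1 ∧
    ∀ k, (pvMulXC c 0 (pvHf c coeff)).getD k 0 = pvSum c coeff k := by
  induction coeff with
  | nil => exact absurd rfl h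
  | cons a as ih =>
    cases as with
    | nil =>
      constructor
      · simp [pvHf, pvMulXC_length]
      · intro k
        unfold pvSum
        simp only [List.length_singleton, Finset.range_one, Finset.sum_singleton,
          List.getD_cons_zero]
        rw [show pvHf c [a] = [a] from rfl, pvMulXC_getD, pvP_one]
        cases k with
        | zero => simp; ring
        | succ j => cases j with
          | zero => simp
          | succ i => simp
    | cons b bs =>
      obtain ⟨qlen, qget⟩ := ih (by simp)
      rw [pvHf_cons]
      revert qlen qget
      generalize pvMulXC c 0 (pvHf c (b :: bs)) = q
      intro qlen qget
      cases q with
      | nil => simp at qlen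
      | cons q0 qs => ?_
      constructor
      · rw [show pvAddHead a (q0 :: qs) = (q0 + a) :: qs from rfl, pvMulXC_length]
        simp only [List.length_cons] at qlen ⊢
        omega
      · intro k
        rw [show pvAddHead a (q0 :: qs) = (q0 + a) :: qs from rfl, pvMulXC_getD]
        unfold pvSum
        rw [show (a :: b :: bs).length = (b :: bs).length + 1 from rfl, Finset.sum_range_succ']
        simp only [List.getD_cons_succ, List.getD_cons_zero]
        have pstep : ∀ (i k : Nat), (pvP c (i + 1 + 1)).getD k 0
            = ((0:Int) :: pvP c (i + 1)).getD k 0 - c * (pvP c (i + 1)).getD k 0 := by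
          intro i k
          rw [show pvP c (i + 1 + 1) = pvMulXC c 0 (pvP c (i + 1)) from rfl, pvMulXC_getD]
        have key : ∀ k, ((0 : Int) :: q0 :: qs).getD k 0 - c * ((q0 :: qs).getD k 0)
            = ∑ i ∈ Finset.range (b :: bs).length,
                (b :: bs).getD i 0 * (pvP c (i + 1 + 1)).getD k 0 := by
          intro k
          cases k with
          | zero =>
            simp only [List.getD_cons_zero]
            rw [show q0 = pvSum c (b :: bs) 0 by simpa using qget 0]
            unfold pvSum
            rw [Finset.mul_sum, zero_sub, ← Finset.sum_neg_distrib]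
            apply Finset.sum_congr rfl
            intro i _
            rw [pstep i 0]
            simp only [List.getD_cons_zero]
            ring
          | succ j =>
            simp only [List.getD_cons_succ]
            rw [show (q0 :: qs).getD j 0 = pvSum c (b :: bs) j from qget j,
                show qs.getD j 0 = pvSum c (b :: bs) (j + 1) by simpa using qget (j + 1)]
            unfold pvSum
            rw [Finset.mul_sum, ← Finset.sum_sub_distrib]
            apply Finset.sum_congr rfl
            intro i _
            rw [pstep i (j + 1)]
            simp only [List.getD_cons_succ]
            ring
        cases k with
        | zero =>
          have k0 := key 0
          simp only [List.getD_cons_zero] at k0 ⊢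
          rw [pvP_one]
          simp only [List.getD_cons_zero]
          rw [← k0]
          ring
        | succ j =>
          have kj := key (j + 1)
          simp only [List.getD_cons_succ] at kj ⊢
          rw [pvP_one]
          cases j with
          | zero =>
            simp only [List.getD_cons_zero, List.getD_cons_succ] at kj ⊢
            rw [← kj]
            ring
          | succ i =>
            simp only [List.getD_cons_succ] at kj ⊢
            rw [show ([] : List Int).getD i 0 = 0 from rfl, ← kj]
            ring

-- `tmp[0] += a` equals pvAddHead on a nonempty list
theorem pvSetHead (a : Int) (tc : List Int) (h : tc ≠ []) :
    tc.set 0 (tc.getD 0 0 + a) = pvAddHead a tc := by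
  cases tc with
  | nil => exact absurd rfl h
  | cons t ts => simp [pvAddHead, List.getD]

-- ===== VERDICT (by name: the statement is the Claim_ definition above) =====
theorem coeff_reorgnize_spec : Claim_equal_coeff_reorgnize := by
  unfold Claim_equal_coeff_reorgnize
  intro coeff c _ hne
  unfold Spec_coeff_reorgnize
  show coeff_reorgnize coeff c = coeff_reorgnize_alt coeff c
  unfold coeff_reorgnize coeff_reorgnize_alt
  simp only [pvResList, pvDrop1, List.length_map, List.length_range]
  rw [show (List.foldl (fun poly a => pvAddHead a (pvMulXC c 0 poly)) [coeff.getLastD 0]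
        coeff.dropLast.reverse) = pvHf c coeff from rfl]
  obtain ⟨alen, aget⟩ := pvOuterFold c coeff coeff.length (le_refl _)
  obtain ⟨blen, bget⟩ := pvBcore c coeff hne
  rw [pvSetHead _ _ (by intro hnil; rw [hnil] at alen; simp at alen)]
  congr 1
  apply pvList_ext_getD
  · rw [alen, blen]
  · intro k
    rw [aget k, bget k]
    rfl
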